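-- pv_equiv track=rewrite | github.com/Bryan-1065913/Python_opdrachten_werkplaats | Semester 1/Werkplaats/Week 1/les_6.py | get_most_excellent_classroom
-- ===== SOURCE A (Python) =====
-- def get_is_student_excellent(student):
--     excellent = False
--     excellent_count = 0
--     no_low_grades = True
--
--     for result in student["resultaten"]:
--         if student["resultaten"][result] == "uitstekend":
--             excellent_count += 1
--         if (
--             student["resultaten"][result] == "onvoldoende"
--             or student["resultaten"][result] == "voldoende"
--         ):
--             no_low_grades = False
--
--     if no_low_grades or excellent_count > 1:
--         excellent = True
--
--     return excellent
--
-- def get_excellent_students(students):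
--     excellent_students = []
--     for student in students:
--         if get_is_student_excellent(student):
--             excellent_students.append(student)
--     return excellent_students
--
-- def get_most_excellent_classroom(students_per_classroom):
--     best_classroom = None
--     best_classroom_count = -1
--     for classroom in students_per_classroom:
--         excellent_students = get_excellent_students(students_per_classroom[classroom])
--         if len(excellent_students) > best_classroom_count:
--             best_classroom = classroom
--             best_classroom_count = len(excellent_students)
--         elif len(excellent_students) == best_classroom_count:
--             best_classroom = f"{best_classroom}, {classroom}"
--     return best_classroom
-- ===== SOURCE B (Python) =====
-- def _count_excellent(students):
--     total = 0
--     for student in students: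
--         tally = {}
--         for grade in student["resultaten"].values():
--             tally[grade] = tally.get(grade, 0) + 1
--         if tally.get("onvoldoende", 0) + tally.get("voldoende", 0) == 0 or tally.get("uitstekend", 0) > 1:
--             total += 1
--     return total
--
--
-- def get_most_excellent_classroom(students_per_classroom):
--     scored = [(room, _count_excellent(studs)) for room, studs in students_per_classroom.items()]
--     ranked = sorted(scored, key=lambda rc: -rc[1])
--     if not ranked:
--         return None
--     best = ranked[0][1]
--     answer = None
--     for room, count in ranked:
--         if count == best:
--             answer = room if answer is None else f"{answer}, {room}"
--     return answer
-- ===== Notes on version B (the rewrite author's own statement) =====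
-- stated objective: alternative
-- what changed: Replaces A's single running-best loop (which tracks best count and concatenates tied names as it goes) by sort-then-scan: score each classroom, stably sort by descending count, read the maximum off the head, and join the leading tied run; the excellence test now builds a per-student grade tally dict instead of A's flag-and-counter loop.
import Mathlib
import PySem

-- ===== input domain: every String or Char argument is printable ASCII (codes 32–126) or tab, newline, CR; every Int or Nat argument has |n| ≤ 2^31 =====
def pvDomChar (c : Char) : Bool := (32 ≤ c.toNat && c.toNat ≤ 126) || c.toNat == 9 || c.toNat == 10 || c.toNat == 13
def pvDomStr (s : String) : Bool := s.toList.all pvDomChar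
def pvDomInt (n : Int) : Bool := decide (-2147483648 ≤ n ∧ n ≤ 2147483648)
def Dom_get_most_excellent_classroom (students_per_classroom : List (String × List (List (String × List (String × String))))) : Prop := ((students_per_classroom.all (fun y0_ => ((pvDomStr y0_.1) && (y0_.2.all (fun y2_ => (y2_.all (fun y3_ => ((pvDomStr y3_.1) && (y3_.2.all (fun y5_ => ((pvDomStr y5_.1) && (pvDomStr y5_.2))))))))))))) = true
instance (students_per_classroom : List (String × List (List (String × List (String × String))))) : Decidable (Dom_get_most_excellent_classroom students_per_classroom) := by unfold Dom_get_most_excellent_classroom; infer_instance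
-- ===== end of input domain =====

-- B replaces A's single running-best loop (which concatenates tied names into the accumulator as it
-- goes) by sort-then-scan: score each classroom, stably sort by descending count, read the maximum
-- off the head and join the leading tied run; the excellence test builds a per-student grade tally
-- dict instead of A's flag-and-counter loop.

-- ===== PORT A =====
-- f"{best_classroom}, {classroom}" (best_classroom is the Optional accumulator; None prints as "None")
def pvFStr (best : Option String) (classroom : String) : String :=
  String.ofList ((match best with | none => "None".toList | some b => b.toList) ++ (", ".toList) ++ classroom.toList)

-- get_is_student_excellent: loop over the resultaten dict's keys with (excellent_count, no_low_grades);
-- 'result' is a key of res, so 'res.getD result ""' is exactly student["resultaten"][result] (no KeyError possible)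
def pvA_is_excellent (res : PySem.Dict String String) : Bool :=
  let st := res.keys.foldl (fun (st : Int × Bool) result =>
      let st1 := if res.getD result "" == "uitstekend" then (st.1 + 1, st.2) else st
      if res.getD result "" == "onvoldoende" || res.getD result "" == "voldoende"
      then (st1.1, false) else st1)
    (0, true)
  st.2 || st.1 > 1

-- get_excellent_students (the student["resultaten"] lookup cannot miss under Pre_, see the guard below)
def pvA_excellent_students (students : List (List (String × List (String × String)))) :
    List (List (String × List (String × String))) :=
  students.foldl (fun acc s =>
    if pvA_is_excellent (PySem.Dict.ofList ((PySem.Dict.ofList s).getD "resultaten" [])) then acc ++ [s] else acc) []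

def get_most_excellent_classroom (students_per_classroom : List (String × List (List (String × List (String × String))))) : Option String :=
  let d := PySem.Dict.ofList students_per_classroom
  -- totality guard: a student dict without the key "resultaten" makes the Python raise KeyError (excluded by Pre_)
  if d.values.all (fun studs => studs.all (fun s => (PySem.Dict.ofList s).contains "resultaten")) then
    (d.keys.foldl (fun (st : Option String × Int) classroom =>
        let ex := pvA_excellent_students (d.getD classroom [])
        if (ex.length : Int) > st.2 then (some classroom, (ex.length : Int))
        else if (ex.length : Int) == st.2 then (some (pvFStr st.1 classroom), st.2)
        else st)
      (none, -1)).1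
  else none

-- ===== PORT B =====
-- _count_excellent's per-student body: build a tally dict of the grade values and test it
def pvB_student_excellent (student : List (String × List (String × String))) : Bool :=
  let tally := (PySem.Dict.ofList ((PySem.Dict.ofList student).getD "resultaten" [])).values.foldl
      (fun (t : PySem.Dict String Int) grade => t.insert grade (t.getD grade 0 + 1))
      (PySem.Dict.ofList [])
  tally.getD "onvoldoende" 0 + tally.getD "voldoende" 0 == 0 || tally.getD "uitstekend" 0 > 1

-- _count_excellent: total up the students passing the tally test
def pvB_count_excellent (students : List (List (String × List (String × String)))) : Int :=
  students.foldl (fun total student =>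
    if pvB_student_excellent student then total + 1 else total) 0

-- f"{answer}, {room}" with answer a String
def pvJoin2 (a room : String) : String :=
  String.ofList (a.toList ++ (", ".toList) ++ room.toList)

def get_most_excellent_classroom_alt (students_per_classroom : List (String × List (List (String × List (String × String))))) : Option String :=
  let d := PySem.Dict.ofList students_per_classroom
  -- totality guard: same KeyError as in A (B also does student["resultaten"]); excluded by Pre_
  if d.values.all (fun studs => studs.all (fun s => (PySem.Dict.ofList s).contains "resultaten")) then
    let scored := d.items.map (fun p => (p.1, pvB_count_excellent p.2))
    let ranked := PySem.List.sorted scored (fun rc => -rc.2) false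
    match ranked with
    | [] => none
    | (_, best) :: _ =>
        ranked.foldl (fun (answer : Option String) rc =>
          if rc.2 == best then
            some (match answer with | none => rc.1 | some a => pvJoin2 a rc.1)
          else answer) none
  else none

-- ===== PRECONDITION & SPEC =====
-- Pre_ excludes exactly the inputs where some processed student dict lacks the key "resultaten": there
-- both Pythons raise KeyError.
def Pre_get_most_excellent_classroom (students_per_classroom : List (String × List (List (String × List (String × String))))) : Prop :=
  ∀ studs ∈ (PySem.Dict.ofList students_per_classroom).values, ∀ s ∈ studs,
    (PySem.Dict.ofList s).contains "resultaten" = true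
instance (students_per_classroom : List (String × List (List (String × List (String × String))))) : Decidable (Pre_get_most_excellent_classroom students_per_classroom) := by unfold Pre_get_most_excellent_classroom; infer_instance

def pvWitness_get_most_excellent_classroom : (List (String × List (List (String × List (String × String))))) :=
  [("1A", [[("resultaten", [("wiskunde", "uitstekend"), ("taal", "goed")])]]), ("1B", [])]

def Spec_get_most_excellent_classroom (students_per_classroom : List (String × List (List (String × List (String × String))))) (out : Option String) : Prop := out = get_most_excellent_classroom_alt students_per_classroom
instance (students_per_classroom : List (String × List (List (String × List (String × String))))) (out : Option String) : Decidable (Spec_get_most_excellent_classroom students_per_classroom out) := by unfold Spec_get_most_excellent_classroom; infer_instance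

-- ===== CLAIM (what is proved, stated in full; the proofs are below) =====
def Claim_equal_get_most_excellent_classroom : Prop := ∀ (students_per_classroom : List (String × List (List (String × List (String × String))))), Dom_get_most_excellent_classroom students_per_classroom → Pre_get_most_excellent_classroom students_per_classroom → Spec_get_most_excellent_classroom students_per_classroom (get_most_excellent_classroom students_per_classroom)

-- ===== LEMMAS AND PROOFS =====

-- A's per-resultaten loop, unrolled: count of "uitstekend" values and "no low grade" flag
lemma pvA_loop_eq (l : List String) (g : String → String) (n : Int) (b : Bool) :
    l.foldl (fun (st : Int × Bool) result =>
        let st1 := if g result == "uitstekend" then (st.1 + 1, st.2) else st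
        if g result == "onvoldoende" || g result == "voldoende" then (st1.1, false) else st1)
      (n, b)
    = (n + ((l.map g).count "uitstekend" : Nat),
       b && (l.map g).all (fun v => !(v == "onvoldoende" || v == "voldoende"))) := by
  induction l generalizing n b with
  | nil => simp
  | cons x t ih =>
    simp only [List.foldl_cons, List.map_cons, List.count_cons, List.all_cons]
    by_cases hu : (g x == "uitstekend") = true <;>
      by_cases hl : (g x == "onvoldoende" || g x == "voldoende") = true <;>
        (simp only [hu, hl, if_true, if_false, Bool.false_eq_true]; rw [ih];
          refine Prod.ext ?_ ?_) <;> (simp_all; try omega)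

-- "no grade is onvoldoende/voldoende" as a condition on the two counts
lemma pvNoLow_eq (l : List String) :
    l.all (fun v => !(v == "onvoldoende" || v == "voldoende"))
    = (((l.count "onvoldoende" : Nat) : Int) + ((l.count "voldoende" : Nat) : Int) == 0) := by
  rw [Bool.eq_iff_iff]
  simp only [List.all_eq_true, Bool.not_eq_eq_eq_not, Bool.not_true, Bool.or_eq_false_iff,
    beq_eq_false_iff_ne, ne_eq, beq_iff_eq]
  constructor
  · intro h
    have h1 : l.count "onvoldoende" = 0 := List.count_eq_zero.mpr (fun hm => (h _ hm).1 rfl)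
    have h2 : l.count "voldoende" = 0 := List.count_eq_zero.mpr (fun hm => (h _ hm).2 rfl)
    simp [h1, h2]
  · intro h v hv
    have h1 : (l.count "onvoldoende" : Int) = 0 ∧ (l.count "voldoende" : Int) = 0 := by
      constructor <;> omega
    refine ⟨fun hc => ?_, fun hc => ?_⟩
    · subst hc; have := List.count_eq_zero.mp (by exact_mod_cast h1.1); exact this hv
    · subst hc; have := List.count_eq_zero.mp (by exact_mod_cast h1.2); exact this hv

-- the tally dict built by B reads back as List.count
lemma pvTally_getD (l : List String) (v : String) :
    (l.foldl (fun (t : PySem.Dict String Int) grade => t.insert grade (t.getD grade 0 + 1))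
      (PySem.Dict.ofList [])).getD v 0 = (l.count v : Nat) := by
  rw [PySem.Dict.getD_foldl_insert_add_one]
  have h0 : (PySem.Dict.ofList ([] : List (String × Int))).getD v 0 = 0 := rfl
  rw [h0, zero_add]

-- the two per-student excellence tests agree
lemma pvTest_eq (s : List (String × List (String × String))) :
    pvB_student_excellent s
    = pvA_is_excellent (PySem.Dict.ofList ((PySem.Dict.ofList s).getD "resultaten" [])) := by
  unfold pvB_student_excellent pvA_is_excellent
  set res := PySem.Dict.ofList ((PySem.Dict.ofList s).getD "resultaten" []) with hres
  have hnd : res.keys.Nodup := PySem.Dict.nodup_keys_ofList _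
  have hv : res.values = res.keys.map (fun k => res.getD k "") := PySem.Dict.values_eq_map_keys res hnd ""
  rw [pvA_loop_eq res.keys (fun k => res.getD k "") 0 true]
  simp only [pvTally_getD, Bool.true_and]
  rw [← hv, pvNoLow_eq, zero_add]

-- B's counting loop is a countP over the common predicate
lemma pvFoldl_count (l : List (List (String × List (String × String))))
    (p : List (String × List (String × String)) → Bool) (n : Int) :
    l.foldl (fun t s => if p s then t + 1 else t) n = n + (l.countP p : Nat) := by
  induction l generalizing n with
  | nil => simp
  | cons x t ih =>
    simp only [List.foldl_cons, List.countP_cons]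
    by_cases h : p x = true <;> simp [h, ih] <;> push_cast <;> omega

def pvQ (s : List (String × List (String × String))) : Bool :=
  pvA_is_excellent (PySem.Dict.ofList ((PySem.Dict.ofList s).getD "resultaten" []))

-- A's excellent-student collection has length = B's count
lemma pvLenA_eq (students : List (List (String × List (String × String)))) :
    ((pvA_excellent_students students).length : Int) = (students.countP pvQ : Nat) := by
  unfold pvA_excellent_students
  rw [PySem.List.foldl_append_if_eq_filter, List.countP_eq_length_filter]
  rfl

lemma pvCountB_eq (students : List (List (String × List (String × String)))) :
    pvB_count_excellent students = (students.countP pvQ : Nat) := by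
  unfold pvB_count_excellent
  rw [PySem.List.foldl_congr_mem _ _ (fun total s => if pvQ s then total + 1 else total) _
    (by intro acc s _; rw [pvTest_eq s]; rfl)]
  rw [pvFoldl_count]
  simp

-- joining one more tied classroom is the f-string step
lemma pvJoin_append (ws : List String) (hws : ws ≠ []) (k : String) :
    PySem.Str.join ", " (ws ++ [k]) = pvJoin2 (PySem.Str.join ", " ws) k := by
  have key : ∀ (sep : List Char) (ws : List (List Char)), ws ≠ [] → ∀ (k : List Char),
      sep.intercalate (ws ++ [k]) = sep.intercalate ws ++ sep ++ k := by
    intro sep ws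
    induction ws with
    | nil => intro h; exact absurd rfl h
    | cons w t ih =>
      intro _ k
      cases t with
      | nil => simp [List.intercalate, List.intersperse]
      | cons w2 t2 =>
        have step : ∀ (a b : List Char) (r : List (List Char)),
            sep.intercalate (a :: b :: r) = a ++ (sep ++ sep.intercalate (b :: r)) := by
          intro a b r; simp [List.intercalate, List.intersperse]
        calc sep.intercalate ((w :: w2 :: t2) ++ [k])
            = w ++ (sep ++ sep.intercalate ((w2 :: t2) ++ [k])) := step w w2 (t2 ++ [k])
          _ = w ++ (sep ++ (sep.intercalate (w2 :: t2) ++ sep ++ k)) := by rw [ih (by simp) k]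
          _ = (w ++ (sep ++ sep.intercalate (w2 :: t2))) ++ sep ++ k := by simp
          _ = sep.intercalate (w :: w2 :: t2) ++ sep ++ k := by rw [← step]
  unfold PySem.Str.join pvJoin2 PySem.Chars.join
  congr 1
  simp only [String.toList_ofList]
  rw [List.map_append]
  simp only [List.map_cons, List.map_nil]
  rw [key (", ".toList) (ws.map String.toList) (by simpa using hws) k.toList]

lemma pvJoin_singleton (k : String) : PySem.Str.join ", " [k] = k := by
  simp [PySem.Str.join, PySem.Chars.join, List.intercalate]

-- B's answer-building loop over the tied names is the ", "-join
lemma pvFoldl_join (names : List String) (h : names ≠ []) :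
    names.foldl (fun (ans : Option String) room =>
        some (match ans with | none => room | some a => pvJoin2 a room)) none
    = some (PySem.Str.join ", " names) := by
  induction names using List.reverseRecOn with
  | nil => exact absurd rfl h
  | append_singleton t k ih =>
    cases t with
    | nil => simp [pvJoin_singleton]
    | cons w tw =>
      rw [List.foldl_append, ih (by simp), pvJoin_append _ (by simp) k]
      rfl

-- one-step unfoldings of PySem.List.insertBy
lemma pvInsertBy_nil {α : Type} (before : α → α → Bool) (x : α) :
    PySem.List.insertBy before x [] = [x] := rfl
lemma pvInsertBy_cons {α : Type} (before : α → α → Bool) (x y : α) (ys : List α) :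
    PySem.List.insertBy before x (y :: ys)
    = if before x y then x :: y :: ys else y :: PySem.List.insertBy before x ys := rfl

-- STABILITY of the insertion sort: inserting a non-matching element preserves the filtered subsequence
lemma pvFilter_insertBy_neg {α : Type} (before : α → α → Bool) (p : α → Bool) (x : α)
    (acc : List α) (hx : p x = false) :
    (PySem.List.insertBy before x acc).filter p = acc.filter p := by
  induction acc with
  | nil => rw [pvInsertBy_nil]; simp [hx]
  | cons y ys ih =>
    rw [pvInsertBy_cons]
    by_cases h : before x y = true
    · simp [h, hx]
    · simp only [h, Bool.false_eq_true, if_false, List.filter_cons]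
      by_cases hy : p y = true <;> simp [hy, ih]

-- inserting a matching element into a key-sorted list puts it AFTER every matching element
lemma pvFilter_insertBy_pos {α : Type} (key : α → Int) (x : α) (acc : List α)
    (hp : acc.Pairwise (fun a b => key a ≤ key b)) :
    (PySem.List.insertBy (fun a b => decide (key a < key b)) x acc).filter (fun y => key y == key x)
    = acc.filter (fun y => key y == key x) ++ [x] := by
  induction acc with
  | nil => rw [pvInsertBy_nil]; simp
  | cons y ys ih =>
    rcases List.pairwise_cons.mp hp with ⟨hy, htail⟩
    rw [pvInsertBy_cons]
    by_cases hxy : key x < key y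
    · have hfy : (key y == key x) = false := by simp [beq_iff_eq]; omega
      have hfys : ys.filter (fun z => key z == key x) = [] := by
        rw [List.filter_eq_nil_iff]
        intro z hz
        have := hy z hz
        simp [beq_iff_eq]
        omega
      simp [hxy, hfy, hfys]
    · simp only [hxy, decide_false, Bool.false_eq_true, if_false, List.filter_cons]
      by_cases hyk : (key y == key x) = true <;> simp [hyk, ih htail]

-- hence: filtering the stably sorted list at one key value gives the original-order filter
lemma pvFilter_sorted {α : Type} (key : α → Int) (k : Int) (xs : List α) :
    (PySem.List.sorted xs key false).filter (fun y => key y == k)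
    = xs.filter (fun y => key y == k) := by
  induction xs using List.reverseRecOn with
  | nil => rfl
  | append_singleton t x ih =>
    rw [PySem.List.sorted_eq_foldl_insertBy] at ih ⊢
    rw [List.foldl_append, List.foldl_cons, List.foldl_nil, List.filter_append]
    have hpw : (List.foldl (fun acc x => PySem.List.insertBy (fun a b => decide (key a < key b)) x acc) [] t).Pairwise
        (fun a b => key a ≤ key b) := by
      have := PySem.List.sorted_pairwise t key
      rwa [PySem.List.sorted_eq_foldl_insertBy] at this
    by_cases hx : (key x == k) = true
    · have hk : k = key x := (eq_of_beq hx).symm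
      subst hk
      rw [pvFilter_insertBy_pos key x _ hpw, ih]
      have hone : List.filter (fun y => key y == key x) [x] = [x] := by simp
      rw [hone]
    · rw [pvFilter_insertBy_neg _ _ _ _ (by simpa using hx), ih]
      simp [List.filter_cons, hx]

-- A's running-best loop over the classroom keys computes: the max count, and the join of every key attaining it
lemma loopA_spec (c : String → Int) (hc : ∀ k, 0 ≤ c k) (k0 : String) (ks : List String) :
    (k0 :: ks).foldl (fun (st : Option String × Int) k =>
        if c k > st.2 then (some k, c k)
        else if c k == st.2 then (some (pvFStr st.1 k), st.2)
        else st)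
      (none, -1)
    = (some (PySem.Str.join ", " ((k0 :: ks).filter (fun k => c k == (ks.map c).foldl max (c k0)))),
       (ks.map c).foldl max (c k0)) := by
  induction ks using List.reverseRecOn with
  | nil =>
    have h0 : c k0 > -1 := by have := hc k0; omega
    simp [h0, pvJoin_singleton]
  | append_singleton t k ih =>
    have hmax := PySem.List.le_foldl_max (t.map c) (c k0)
    set m := (t.map c).foldl max (c k0) with hm
    have hm' : ((t ++ [k]).map c).foldl max (c k0) = max m (c k) := by
      rw [List.map_append, List.foldl_append, ← hm]; simp
    rw [← List.cons_append, List.foldl_append, ih, hm']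
    simp only [List.foldl_cons, List.foldl_nil]
    by_cases hgt : c k > m
    · have hmm : max m (c k) = c k := by omega
      have hfilt : (k0 :: t).filter (fun j => c j == c k) = [] := by
        rw [List.filter_eq_nil_iff]
        intro j hj
        simp only [beq_iff_eq]
        rcases List.mem_cons.mp hj with h | h
        · subst h; have := hmax.1; omega
        · have := hmax.2 (c j) (List.mem_map_of_mem h); omega
      rw [if_pos (by exact hgt), hmm, List.filter_append, hfilt]
      simp [pvJoin_singleton]
    · by_cases heq : c k = m
      · have hmm : max m (c k) = m := by omega
        have hck : (c k == m) = true := by simp [heq]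
        have hne : (k0 :: t).filter (fun j => c j == m) ≠ [] := by
          rcases PySem.List.foldl_max_mem (t.map c) (c k0) with h | h
          · have hck0 : c k0 = m := by rw [hm, h]
            intro hnil
            have : k0 ∈ (k0 :: t).filter (fun j => c j == m) := by
              simp [List.mem_filter, hck0]
            rw [hnil] at this; exact absurd this (List.not_mem_nil)
          · rcases List.mem_map.mp h with ⟨j, hj, hcj⟩
            have hcj' : c j = m := by rw [hm, hcj]
            intro hnil
            have : j ∈ (k0 :: t).filter (fun j => c j == m) := by
              simp [List.mem_filter, hj, hcj']
            rw [hnil] at this; exact absurd this (List.not_mem_nil)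
        rw [if_neg (by omega), if_pos hck, hmm, List.filter_append]
        have hfk : List.filter (fun j => c j == m) [k] = [k] := by simp [heq]
        rw [hfk, pvJoin_append _ hne k]
        rfl
      · have hlt : c k < m := by omega
        have hmm : max m (c k) = m := by omega
        have hck : (c k == m) = false := by simp; omega
        rw [if_neg (by omega), if_neg (by simp [hck]), hmm, List.filter_append]
        have hfk : List.filter (fun j => c j == m) [k] = [] := by simp; omega
        rw [hfk, List.append_nil]

-- ===== VERDICT (by name: the statement is the Claim_ definition above) =====
theorem get_most_excellent_classroom_spec : Claim_equal_get_most_excellent_classroom := by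
  intro spc _ hpre
  unfold Spec_get_most_excellent_classroom get_most_excellent_classroom get_most_excellent_classroom_alt
  set d := PySem.Dict.ofList spc with hd
  have hg : (d.values.all (fun studs => studs.all (fun s => (PySem.Dict.ofList s).contains "resultaten"))) = true := by
    rw [List.all_eq_true]
    intro studs hstuds
    rw [List.all_eq_true]
    intro s hs
    exact hpre studs hstuds s hs
  simp only [hg, if_true]
  have hnd : d.keys.Nodup := PySem.Dict.nodup_keys_ofList _
  have hitems : d.items = d.keys.map (fun k => (k, d.getD k [])) := PySem.Dict.items_eq_map_keys d hnd []
  set c : String → Int := fun k => ((d.getD k []).countP pvQ : Nat) with hc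
  have hcnn : ∀ k, 0 ≤ c k := by intro k; simp [hc]
  have hA : ∀ (st : Option String × Int) k,
      (let ex := pvA_excellent_students (d.getD k [])
       if (ex.length : Int) > st.2 then (some k, (ex.length : Int))
       else if (ex.length : Int) == st.2 then (some (pvFStr st.1 k), st.2) else st)
      = (if c k > st.2 then (some k, c k)
         else if c k == st.2 then (some (pvFStr st.1 k), st.2) else st) := by
    intro st k
    simp only [pvLenA_eq, hc]
  rw [PySem.List.foldl_congr_mem _ _ _ _ (fun acc k _ => hA acc k)]
  have hscored : d.items.map (fun p => (p.1, pvB_count_excellent p.2))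
      = d.keys.map (fun k => (k, c k)) := by
    rw [hitems, List.map_map]
    refine List.map_congr_left ?_
    intro k _
    simp [Function.comp, pvCountB_eq, hc]
  rw [hscored]
  cases hk : d.keys with
  | nil => rfl
  | cons k0 kt =>
    rw [loopA_spec c hcnn k0 kt]
    set m := (kt.map c).foldl max (c k0) with hm
    set f : String → String × Int := fun k => (k, c k) with hf
    set scored := (k0 :: kt).map f with hscored2
    set ranked := PySem.List.sorted scored (fun rc => -rc.2) false with hranked
    have hrne : ranked ≠ [] := by
      rw [hranked, Ne, PySem.List.sorted_eq_nil_iff]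
      simp [hscored2]
    cases hr : ranked with
    | nil => exact absurd hr hrne
    | cons r0 rt =>
      obtain ⟨rn, best⟩ := r0
      -- best = m
      have hhead_le : ∀ y ∈ scored, -best ≤ -y.2 := by
        intro y hy
        have := PySem.List.key_head_sorted_le scored (fun rc => -rc.2) (hranked ▸ hr) y hy
        simpa using this
      have hle : ∀ k ∈ (k0 :: kt), c k ≤ best := by
        intro k hk'
        have := hhead_le (f k) (List.mem_map_of_mem hk')
        simp [hf] at this
        omega
      have hbest_mem : (rn, best) ∈ scored := by
        have : (rn, best) ∈ ranked := by rw [hr]; exact List.mem_cons_self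
        rw [hranked] at this
        exact (PySem.List.mem_sorted _ _ _ _).mp this
      have hbest_c : ∃ k ∈ (k0 :: kt), best = c k := by
        rcases List.mem_map.mp hbest_mem with ⟨k, hk', hfk⟩
        exact ⟨k, hk', by rw [hf] at hfk; cases hfk; rfl⟩
      have hmax := PySem.List.le_foldl_max (kt.map c) (c k0)
      have hbm : best = m := by
        rcases hbest_c with ⟨k, hk', hbk⟩
        have h1 : best ≤ m := by
          rcases List.mem_cons.mp hk' with h | h
          · subst h; rw [hbk]; exact hmax.1
          · rw [hbk]; exact hmax.2 _ (List.mem_map_of_mem h)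
        have h2 : m ≤ best := by
          rcases PySem.List.foldl_max_mem (kt.map c) (c k0) with h | h
          · rw [← hm] at h; rw [h]; exact hle k0 List.mem_cons_self
          · rcases List.mem_map.mp h with ⟨j, hj, hcj⟩
            rw [← hm] at hcj; rw [← hcj]
            exact hle j (List.mem_cons_of_mem _ hj)
        omega
      -- B's loop = fold over the filtered tied run
      simp only [hr]
      have hstep : (((rn, best) :: rt).foldl (fun (answer : Option String) rc =>
            if rc.2 == best then
              some (match answer with | none => rc.1 | some a => pvJoin2 a rc.1)
            else answer) none)
          = ((((rn, best) :: rt).filter (fun rc => rc.2 == best)).foldl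
              (fun (answer : Option String) rc =>
                some (match answer with | none => rc.1 | some a => pvJoin2 a rc.1)) none) := by
        exact PySem.List.foldl_if_eq_foldl_filter _ _ _ _
      rw [hstep]
      have hpred : ∀ rc ∈ ((rn, best) :: rt), ((rc.2 == best) = ((fun y : String × Int => -y.2 == -best) rc)) := by
        intro rc _
        by_cases h : rc.2 = best <;> simp [h]
      rw [List.filter_congr hpred, ← hr, hranked,
        pvFilter_sorted (fun rc : String × Int => -rc.2) (-best) scored]
      have hpred2 : ∀ rc ∈ scored, (((fun y : String × Int => -y.2 == -best) rc) = (rc.2 == best)) := by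
        intro rc _
        by_cases h : rc.2 = best <;> simp [h]
      rw [List.filter_congr hpred2, hscored2, List.filter_map]
      have hcomp : ((fun rc : String × Int => rc.2 == best) ∘ f) = (fun k => c k == m) := by
        funext k; simp [hf, hbm]
      rw [hcomp, List.foldl_map]
      have hne : (k0 :: kt).filter (fun k => c k == m) ≠ [] := by
        rcases PySem.List.foldl_max_mem (kt.map c) (c k0) with h | h
        · rw [← hm] at h
          intro hnil
          have : k0 ∈ (k0 :: kt).filter (fun j => c j == m) := by
            simp [List.mem_filter, h.symm]
          rw [hnil] at this; exact absurd this (List.not_mem_nil)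
        · rcases List.mem_map.mp h with ⟨j, hj, hcj⟩
          rw [← hm] at hcj
          intro hnil
          have : j ∈ (k0 :: kt).filter (fun j => c j == m) := by
            simp [List.mem_filter, hj, hcj]
          rw [hnil] at this; exact absurd this (List.not_mem_nil)
      rw [pvFoldl_join _ hne]
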